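-- pv_equiv track=rewrite | github.com/CBernjus/adventofcode | 2020/python/day_18.py | find_parens
-- ===== SOURCE A (Python) =====
-- from typing import List, Tuple
--
-- def find_parens(tokens: List[str]) -> List[Tuple[int, int, int]]:
--     indices = []
--     openParens = 0
--     currParens = []
--     parens = []
--
--     for i, char in enumerate(tokens):
--         if char == '(':
--             openParens += 1
--             indices.append(i)
--         if char == ')':
--             end = i - sum(map(lambda p: p[2] - p[1],
--                               filter(lambda p: p[0] > openParens, currParens)))
--             currParens.append((openParens, indices.pop(), end))
--             openParens -= 1
--             if openParens == 0:
--                 parens.extend(sorted(currParens, key=lambda paren: paren[0]))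
--                 currParens = []
--
--     return parens
-- ===== SOURCE B (Python) =====
-- from typing import List, Tuple
--
-- # Depth-indexed buckets + per-depth running lengths instead of A's repeated
-- # filter-scan over all closed parens and stable sort per top-level group.
-- def find_parens(tokens: List[str]) -> List[Tuple[int, int, int]]:
--     parens = []
--     starts = []    # stack of raw indices of unmatched '('
--     buckets = []   # buckets[d-1]: tuples closed at depth d in this group, in close order
--     lens = []      # lens[d-1]: total adjusted length of tuples closed at depth d
--     depth = 0
--     for i, char in enumerate(tokens):
--         if char == '(':
--             depth += 1
--             starts.append(i)
--             if depth > len(buckets):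
--                 buckets.append([])
--                 lens.append(0)
--         elif char == ')':
--             start = starts.pop()
--             end = i - sum(lens[depth:])
--             buckets[depth - 1].append((depth, start, end))
--             lens[depth - 1] += end - start
--             depth -= 1
--             if depth == 0:
--                 for b in buckets:
--                     parens.extend(b)
--                 buckets = []
--                 lens = []
--     return parens
-- ===== Notes on version B (the rewrite author's own statement) =====
-- stated objective: alternative
-- what changed: B replaces A's per-close filter-scan over all previously closed parens and the per-group stable sort with depth-indexed state: a per-depth running-length array whose suffix sum gives the end adjustment, and per-depth buckets concatenated in depth order instead of sorting.
import Mathlib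
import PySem

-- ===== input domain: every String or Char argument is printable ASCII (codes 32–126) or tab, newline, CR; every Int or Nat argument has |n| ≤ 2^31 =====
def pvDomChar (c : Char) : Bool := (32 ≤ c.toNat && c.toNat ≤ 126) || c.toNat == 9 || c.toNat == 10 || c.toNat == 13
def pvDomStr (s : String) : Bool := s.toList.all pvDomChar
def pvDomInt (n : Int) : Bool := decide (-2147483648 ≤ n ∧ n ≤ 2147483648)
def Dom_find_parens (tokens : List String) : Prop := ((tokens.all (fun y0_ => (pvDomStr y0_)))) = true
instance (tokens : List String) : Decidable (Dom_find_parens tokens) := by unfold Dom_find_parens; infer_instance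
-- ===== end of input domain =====

-- B replaces A's per-close filter-scan over all closed parens and the per-group
-- stable sort with depth-indexed running lengths (suffix sum) and per-depth buckets.

-- ===== PORT A =====
structure PvStA where
  indices : List Int
  openP : Int
  curr : List (Int × Int × Int)
  parens : List (Int × Int × Int)

-- one iteration of A's loop; 'none' = the IndexError of indices.pop() on an empty stack
def pvStepA (s : PvStA) (ic : Int × String) : Option PvStA :=
  let s1 : PvStA :=
    if ic.2 = "(" then { s with openP := s.openP + 1, indices := s.indices ++ [ic.1] } else s
  if ic.2 = ")" then
    let endv : Int :=
      ic.1 - ((s1.curr.filter (fun p => decide (p.1 > s1.openP))).map (fun p => p.2.2 - p.2.1)).sum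
    match PySem.List.pop? s1.indices with
    | none => none
    | some (st, indices') =>
      let curr' := s1.curr ++ [(s1.openP, st, endv)]
      let openP' := s1.openP - 1
      if openP' = 0 then
        some { indices := indices', openP := openP', curr := [],
               parens := s1.parens ++ PySem.List.sorted curr' (fun p => p.1) }
      else
        some { indices := indices', openP := openP', curr := curr', parens := s1.parens }
  else some s1

def find_parens (tokens : List String) : List (Int × Int × Int) :=
  match (PySem.List.enumerate tokens).foldl (fun acc ic => acc.bind (fun s => pvStepA s ic))
      (some { indices := [], openP := 0, curr := [], parens := [] }) with
  | some s => s.parens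
  | none => []   -- unreachable under Pre_find_parens (Python raises IndexError there)

-- ===== PORT B =====
structure PvStB where
  parens : List (Int × Int × Int)
  starts : List Int
  buckets : List (List (Int × Int × Int))
  lens : List Int
  depth : Int

-- one iteration of B's loop; 'none' = the IndexError of starts.pop() on an empty stack
def pvStepB (s : PvStB) (ic : Int × String) : Option PvStB :=
  if ic.2 = "(" then
    let depth' := s.depth + 1
    let starts' := s.starts ++ [ic.1]
    if decide ((s.buckets.length : Int) < depth') then
      some { s with depth := depth', starts := starts',
                    buckets := s.buckets ++ [[]], lens := s.lens ++ [0] }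
    else
      some { s with depth := depth', starts := starts' }
  else if ic.2 = ")" then
    match PySem.List.pop? s.starts with
    | none => none
    | some (st, starts') =>
      let endv : Int := ic.1 - (PySem.List.slice s.lens (some s.depth)).sum
      -- buckets[depth-1].append(...) / lens[depth-1] += ...: hand-ported as List.modify at
      -- (depth-1).toNat; exact whenever 1 ≤ depth ≤ len buckets = len lens, which holds on every
      -- iteration the pop above succeeds (len starts = depth and depth ≤ len buckets are loop invariants)
      let buckets' := s.buckets.modify (s.depth - 1).toNat (fun b => b ++ [(s.depth, st, endv)])
      let lens' := s.lens.modify (s.depth - 1).toNat (fun v => v + (endv - st))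
      let depth' := s.depth - 1
      if depth' = 0 then
        some { parens := buckets'.foldl (fun acc b => acc ++ b) s.parens,
               starts := starts', buckets := [], lens := [], depth := depth' }
      else
        some { s with starts := starts', buckets := buckets', lens := lens', depth := depth' }
  else some s

def find_parens_alt (tokens : List String) : List (Int × Int × Int) :=
  match (PySem.List.enumerate tokens).foldl (fun acc ic => acc.bind (fun s => pvStepB s ic))
      (some { parens := [], starts := [], buckets := [], lens := [], depth := 0 }) with
  | some s => s.parens
  | none => []   -- unreachable under Pre_find_parens (Python raises IndexError there)

-- ===== PRECONDITION & SPEC =====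
-- Pre_ excludes exactly the inputs with a ')' in excess in some prefix: there the Python A
-- (and B alike) raises IndexError popping from an empty stack.
def Pre_find_parens (tokens : List String) : Prop :=
  ∀ n ≤ tokens.length,
    ((tokens.take n).countP (fun t => t = ")")) ≤ ((tokens.take n).countP (fun t => t = "("))
instance (tokens : List String) : Decidable (Pre_find_parens tokens) := by
  unfold Pre_find_parens; infer_instance

def pvWitness_find_parens : List String := ["(", "(", "x", ")", ")", "(", "y", ")"]

def Spec_find_parens (tokens : List String) (out : List (Int × Int × Int)) : Prop :=
  out = find_parens_alt tokens
instance (tokens : List String) (out : List (Int × Int × Int)) : Decidable (Spec_find_parens tokens out) := by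
  unfold Spec_find_parens; infer_instance

-- ===== CLAIM (what is proved, stated in full; the proofs are below) =====
def Claim_equal_find_parens : Prop :=
  ∀ (tokens : List String), Dom_find_parens tokens → Pre_find_parens tokens →
    Spec_find_parens tokens (find_parens tokens)

-- ===== LEMMAS AND PROOFS =====

-- The coupling invariant between A's and B's loop states.
def PvInv (a : PvStA) (b : PvStB) : Prop :=
  a.parens = b.parens ∧
  a.indices = b.starts ∧
  a.openP = b.depth ∧
  (a.indices.length : Int) = a.openP ∧
  b.lens.length = b.buckets.length ∧
  b.depth ≤ (b.buckets.length : Int) ∧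
  (∀ d : Nat,
    ((a.curr.filter (fun p => decide (p.1 > (d : Int)))).map (fun p => p.2.2 - p.2.1)).sum
      = ((b.lens.drop d).sum : Int)) ∧
  PySem.List.sorted a.curr (fun p => p.1) = b.buckets.flatten ∧
  (∀ j (hj : j < b.buckets.length), ∀ p ∈ b.buckets[j], p.1 = (j : Int) + 1)

def PvRel (oa : Option PvStA) (ob : Option PvStB) : Prop :=
  (oa = none ∧ ob = none) ∨ (∃ a b, oa = some a ∧ ob = some b ∧ PvInv a b)

lemma pv_drop_append_zero (l : List Int) (d : Nat) :
    ((l ++ [(0 : Int)]).drop d).sum = (l.drop d).sum := by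
  induction l generalizing d with
  | nil => cases d <;> simp
  | cons x xs ih =>
    cases d with
    | zero => simp
    | succ d => simpa using ih d

lemma pv_drop_modify_sum (l : List Int) (t d : Nat) (L : Int) (ht : t < l.length) :
    ((l.modify t (fun v => v + L)).drop d).sum
      = (l.drop d).sum + (if d ≤ t then L else 0) := by
  induction l generalizing t d with
  | nil => simp at ht
  | cons x xs ih =>
    cases t with
    | zero =>
      cases d with
      | zero => simp [List.modify]; ring
      | succ d => simp [List.modify]
    | succ t =>
      cases d with
      | zero =>
        have := ih t 0 (by simpa using ht)
        simp [List.modify] at this ⊢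
        omega
      | succ d =>
        have := ih t d (by simpa using ht)
        simp [List.modify] at this ⊢
        omega

lemma pv_insertBy_append_left {α : Type} (bef : α → α → Bool) (x : α) (ys zs : List α)
    (h : ∀ y ∈ ys, bef x y = false) :
    PySem.List.insertBy bef x (ys ++ zs) = ys ++ PySem.List.insertBy bef x zs := by
  induction ys with
  | nil => simp
  | cons y ys ih =>
    have hy : bef x y = false := h y (by simp)
    simp [PySem.List.insertBy, hy]
    exact ih (fun y hy => h y (by simp [hy]))

-- inserting an element whose key is the bucket index (+off) into the flattened buckets
-- lands at the end of its bucket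
lemma pv_insert_flatten (bs : List (List (Int × Int × Int))) (off : Nat)
    (hlab : ∀ j (hj : j < bs.length), ∀ p ∈ bs[j], p.1 = (off : Int) + (j : Int) + 1)
    (t : Nat) (ht : t < bs.length) (x : Int × Int × Int) (hx : x.1 = (off : Int) + (t : Int) + 1) :
    PySem.List.insertBy (fun a b => decide (a.1 < b.1)) x bs.flatten
      = (bs.modify t (fun b => b ++ [x])).flatten := by
  induction bs generalizing off t with
  | nil => simp at ht
  | cons b0 rest ih =>
    have hrest : ∀ z ∈ rest.flatten, (off : Int) + 2 ≤ z.1 := by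
      intro z hz
      rcases List.mem_flatten.1 hz with ⟨l, hl, hzl⟩
      rcases List.mem_iff_getElem.1 hl with ⟨j, hj, rfl⟩
      have := hlab (j + 1) (by simpa using hj) z (by simpa using hzl)
      omega
    cases t with
    | zero =>
      have hskip : ∀ y ∈ b0, (fun (a b : Int × Int × Int) => decide (a.1 < b.1)) x y = false := by
        intro y hy
        have := hlab 0 (by simp) y (by simpa using hy)
        simp only [decide_eq_false_iff_not, not_lt]
        omega
      rw [List.flatten_cons, pv_insertBy_append_left _ _ _ _ hskip]
      have hins : PySem.List.insertBy (fun (a b : Int × Int × Int) => decide (a.1 < b.1)) x rest.flatten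
          = x :: rest.flatten := by
        cases hf : rest.flatten with
        | nil => simp [PySem.List.insertBy]
        | cons z zs =>
          have hz : x.1 < z.1 := by
            have := hrest z (by rw [hf]; simp)
            omega
          simp [PySem.List.insertBy, hz]
      rw [hins]
      simp [List.modify_cons]
    | succ t =>
      have hskip : ∀ y ∈ b0, (fun (a b : Int × Int × Int) => decide (a.1 < b.1)) x y = false := by
        intro y hy
        have := hlab 0 (by simp) y (by simpa using hy)
        simp only [decide_eq_false_iff_not, not_lt]
        omega
      rw [List.flatten_cons, pv_insertBy_append_left _ _ _ _ hskip]
      have hlab' : ∀ j (hj : j < rest.length), ∀ p ∈ rest[j], p.1 = ((off + 1 : Nat) : Int) + (j : Int) + 1 := by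
        intro j hj p hp
        have := hlab (j + 1) (by simpa using hj) p (by simpa using hp)
        push_cast
        push_cast at this
        omega
      rw [ih (off + 1) hlab' t (by simpa using ht) (by push_cast; push_cast at hx; omega)]
      simp

lemma pv_foldl_bind_none {σ ι : Type} (f : σ → ι → Option σ) (l : List ι) :
    l.foldl (fun acc ic => acc.bind (fun s => f s ic)) none = none := by
  induction l with
  | nil => rfl
  | cons x xs ih => simpa using ih

lemma pv_foldl_append_flatten {α : Type} (bs : List (List α)) (init : List α) :
    bs.foldl (fun acc b => acc ++ b) init = init ++ bs.flatten := by
  induction bs generalizing init with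
  | nil => simp
  | cons b bs ih => simp [ih]

lemma pv_step (a : PvStA) (b : PvStB) (h : PvInv a b) (ic : Int × String) :
    PvRel (pvStepA a ic) (pvStepB b ic) := by
  obtain ⟨hp, hi, ho, hlen, hlb, hdb, hsum, hsort, hlab⟩ := h
  by_cases hop : ic.2 = "("
  · simp only [pvStepA, pvStepB, hop, reduceIte, String.reduceEq]
    split_ifs with hgrow
    · refine Or.inr ⟨_, _, rfl, rfl, hp, by rw [hi], by rw [ho], ?_, ?_, ?_, ?_, ?_, ?_⟩
      · simp only [List.length_append, List.length_cons, List.length_nil]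
        push_cast
        omega
      · simp [hlb]
      · simp only [List.length_append, List.length_cons, List.length_nil]
        push_cast
        omega
      · intro d
        simp only
        rw [pv_drop_append_zero]
        exact hsum d
      · simpa using hsort
      · intro j hj p hpj
        simp only [List.length_append, List.length_cons, List.length_nil] at hj
        by_cases hjl : j < b.buckets.length
        · rw [List.getElem_append_left hjl] at hpj
          exact hlab j hjl p hpj
        · have hje : j = b.buckets.length := by omega
          subst hje
          rw [List.getElem_append_right (le_refl _)] at hpj
          simp at hpj
    · refine Or.inr ⟨_, _, rfl, rfl, hp, by rw [hi], by rw [ho], ?_, hlb, ?_, hsum, hsort, hlab⟩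
      · simp only [List.length_append, List.length_cons, List.length_nil]
        push_cast
        omega
      · simp only [decide_eq_true_eq, not_lt] at hgrow
        simp only
        omega
  · by_cases hcl : ic.2 = ")"
    · simp only [pvStepA, pvStepB, hcl, reduceIte, String.reduceEq]
      rw [hi]
      cases hpop : PySem.List.pop? b.starts with
      | none => exact Or.inl ⟨rfl, rfl⟩
      | some r =>
        obtain ⟨st, rest⟩ := r
        dsimp only
        have hlenrest := PySem.List.length_of_pop?_eq_some _ hpop
        dsimp only at hlenrest
        have hstlen : (b.starts.length : Int) = b.depth := by
          rw [← hi, hlen, ho]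
        have hdep1 : 1 ≤ b.depth := by omega
        have hd0 : (0 : Int) ≤ b.depth := by omega
        have hcast : ((b.depth.toNat : Nat) : Int) = b.depth := Int.toNat_of_nonneg hd0
        have hend : (List.map (fun p => p.2.2 - p.2.1)
              (List.filter (fun p => decide (p.1 > a.openP)) a.curr)).sum
            = ((PySem.List.slice b.lens (some b.depth)).sum : Int) := by
          rw [PySem.List.slice_from b.lens hd0, ← hsum b.depth.toNat]
          rw [ho, hcast]
        rw [hend, ho]
        set endv : Int := ic.1 - (PySem.List.slice b.lens (some b.depth)).sum with hendv
        set x : Int × Int × Int := (b.depth, st, endv) with hxdef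
        set t : Nat := (b.depth - 1).toNat with htdef
        have htb : t < b.buckets.length := by omega
        have htl : t < b.lens.length := by omega
        have htc : (t : Int) = b.depth - 1 := by omega
        have hsort' : PySem.List.sorted (a.curr ++ [x]) (fun p => p.1)
            = (b.buckets.modify t (fun bk => bk ++ [x])).flatten := by
          rw [PySem.List.sorted_eq_foldl_insertBy, List.foldl_append]
          simp only [List.foldl_cons, List.foldl_nil]
          rw [← PySem.List.sorted_eq_foldl_insertBy, hsort]
          exact pv_insert_flatten b.buckets 0
            (by intro j hj p hpj; simpa using hlab j hj p hpj) t htb x (by simp [hxdef]; omega)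
        have hsum' : ∀ d : Nat,
            (List.map (fun p => p.2.2 - p.2.1)
              (List.filter (fun p => decide (p.1 > (d : Int))) (a.curr ++ [x]))).sum
            = ((b.lens.modify t (fun v => v + (endv - st))).drop d).sum := by
          intro d
          rw [pv_drop_modify_sum _ _ _ _ htl, List.filter_append, List.map_append, List.sum_append,
            hsum d]
          by_cases hgt : ((d : Int) < b.depth)
          · rw [if_pos (by omega)]
            have : List.filter (fun p => decide (p.1 > (d : Int))) [x] = [x] := by
              simp [hxdef]
              omega
            rw [this]
            simp [hxdef]
          · rw [if_neg (by omega)]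
            have : List.filter (fun p => decide (p.1 > (d : Int))) [x] = [] := by
              simp [hxdef]
              omega
            rw [this]
            simp
        have hlab' : ∀ j (hj : j < (b.buckets.modify t (fun bk => bk ++ [x])).length),
            ∀ p ∈ (b.buckets.modify t (fun bk => bk ++ [x]))[j], p.1 = (j : Int) + 1 := by
          intro j hj p hpj
          rw [List.getElem_modify] at hpj
          by_cases hjt : t = j
          · rw [if_pos hjt] at hpj
            rcases List.mem_append.1 hpj with hold | hnew
            · exact hlab j (by simpa [List.length_modify] using hj) p hold
            · simp only [List.mem_singleton] at hnew
              subst hnew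
              simp [hxdef]
              omega
          · rw [if_neg hjt] at hpj
            exact hlab j (by simpa [List.length_modify] using hj) p hpj
        split_ifs with hz
        · refine Or.inr ⟨_, _, rfl, rfl, ?_, rfl, rfl, ?_, rfl, by simp [hz], ?_, ?_, ?_⟩
          · simp only
            rw [pv_foldl_append_flatten, hp, hsort']
          · simp only at ⊢
            omega
          · intro d
            simp
          · simp [PySem.List.sorted]
          · intro j hj p hpj
            simp at hj
        · refine Or.inr ⟨_, _, rfl, rfl, hp, rfl, rfl, ?_, ?_, ?_, hsum', hsort', hlab'⟩
          · simp only at ⊢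
            omega
          · simp [List.length_modify, hlb]
          · simp only [List.length_modify]
            omega
    · simp only [pvStepA, pvStepB, if_neg hop, if_neg hcl]
      exact Or.inr ⟨a, b, rfl, rfl, hp, hi, ho, hlen, hlb, hdb, hsum, hsort, hlab⟩

lemma pv_fold (l : List (Int × String)) (a : PvStA) (b : PvStB) (h : PvInv a b) :
    PvRel (l.foldl (fun acc ic => acc.bind (fun s => pvStepA s ic)) (some a))
          (l.foldl (fun acc ic => acc.bind (fun s => pvStepB s ic)) (some b)) := by
  induction l generalizing a b with
  | nil => exact Or.inr ⟨a, b, rfl, rfl, h⟩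
  | cons ic l ih =>
    simp only [List.foldl_cons, Option.bind_some]
    rcases pv_step a b h ic with ⟨h1, h2⟩ | ⟨a', b', h1, h2, hinv⟩
    · rw [h1, h2]
      left
      exact ⟨pv_foldl_bind_none _ l, pv_foldl_bind_none _ l⟩
    · rw [h1, h2]
      exact ih a' b' hinv

-- ===== VERDICT (by name: the statement is the Claim_ definition above) =====
theorem find_parens_spec : Claim_equal_find_parens := by
  intro tokens _hdom _hpre
  unfold Spec_find_parens find_parens find_parens_alt
  have h := pv_fold (PySem.List.enumerate tokens)
    { indices := [], openP := 0, curr := [], parens := [] }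
    { parens := [], starts := [], buckets := [], lens := [], depth := 0 }
    (by
      refine ⟨rfl, rfl, rfl, rfl, rfl, by simp, ?_, rfl, ?_⟩
      · intro d; simp
      · intro j hj; simp at hj)
  rcases h with ⟨h1, h2⟩ | ⟨sa, sb, h1, h2, hinv⟩
  · rw [h1, h2]
  · rw [h1, h2]; exact hinv.1
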